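-- pv_equiv track=rewrite | github.com/questionmarcus/mooc-flask-api | app.py | pathCount
-- ===== SOURCE A (Python) =====
-- def pathCount(user):
--     nonesRemoved = [x["exercise"]["tutorial"] for x in user if x["exercise"] != None]
--     if len(nonesRemoved) != 0:
--         path = []
--         prev = nonesRemoved[0]
--         for tut in nonesRemoved[1:]:
--             if tut != prev:
--                 path.append((prev,tut))
--                 prev = tut
--         return path
-- ===== SOURCE B (Python) =====
-- def pathCount(user):
--     nonesRemoved = [x["exercise"]["tutorial"] for x in user if x["exercise"] != None]
--     if nonesRemoved:
--         compressed = []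
--         for t in nonesRemoved:
--             if not compressed or compressed[-1] != t:
--                 compressed.append(t)
--         return list(zip(compressed, compressed[1:]))
-- ===== Notes on version B (the rewrite author's own statement) =====
-- stated objective: alternative
-- what changed: A tracks a prev variable and emits (prev,tut) pairs in one stateful pass; B first collapses consecutive duplicates into a compressed list and then zips it with its own tail.
import Mathlib
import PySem

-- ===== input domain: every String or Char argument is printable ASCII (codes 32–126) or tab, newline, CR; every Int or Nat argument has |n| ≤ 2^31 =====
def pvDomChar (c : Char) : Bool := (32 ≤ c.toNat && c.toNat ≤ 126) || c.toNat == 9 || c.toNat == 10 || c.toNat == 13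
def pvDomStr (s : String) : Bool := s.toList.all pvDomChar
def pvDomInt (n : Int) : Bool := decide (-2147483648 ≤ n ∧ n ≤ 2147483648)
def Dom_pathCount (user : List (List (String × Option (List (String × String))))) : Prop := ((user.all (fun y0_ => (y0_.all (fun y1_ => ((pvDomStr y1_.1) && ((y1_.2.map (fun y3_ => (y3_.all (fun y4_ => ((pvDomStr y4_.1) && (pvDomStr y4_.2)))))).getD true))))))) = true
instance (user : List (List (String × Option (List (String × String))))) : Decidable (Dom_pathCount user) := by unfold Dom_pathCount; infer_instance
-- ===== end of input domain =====

-- B collapses consecutive duplicates into a compressed list and zips it with its tail,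
-- instead of A's stateful prev-tracking pass; same return value on all inputs admitted by Pre_.

-- dict lookup on an association list: first match (Python d[k]; none = KeyError, excluded by Pre_)
def pvLookup {ν : Type} (d : List (String × ν)) (k : String) : Option ν :=
  (d.find? (fun p => p.1 == k)).map (·.2)

-- ===== PORT A =====
-- the filter+map comprehension; the .getD defaults are only reachable outside Pre_pathCount (KeyError in Python)
def pvNonesRemoved (user : List (List (String × Option (List (String × String))))) : List String :=
  (user.filter (fun x => ((pvLookup x "exercise").getD none).isSome)).map
    (fun x => (pvLookup (((pvLookup x "exercise").getD none).getD []) "tutorial").getD "")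

-- A's for-loop over nonesRemoved[1:] with state (path, prev)
def pathCountLoop : List (String × String) → String → List String → List (String × String)
  | path, _, [] => path
  | path, prev, tut :: rest =>
      if tut ≠ prev then pathCountLoop (path ++ [(prev, tut)]) tut rest
      else pathCountLoop path prev rest

def pathCount (user : List (List (String × Option (List (String × String))))) : Option (List (String × String)) :=
  match pvNonesRemoved user with
  | [] => none                     -- len == 0: falls through, implicit None
  | prev :: rest => some (pathCountLoop [] prev rest)

-- ===== PORT B =====
-- B's loop: append t unless it repeats the last element of compressed
def pvCompressStep (acc : List String) (t : String) : List String :=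
  if acc.isEmpty || acc.getLast? != some t then acc ++ [t] else acc

def pathCount_alt (user : List (List (String × Option (List (String × String))))) : Option (List (String × String)) :=
  match pvNonesRemoved user with
  | [] => none
  | prev :: rest =>
      let compressed := (prev :: rest).foldl pvCompressStep []
      some (compressed.zip compressed.tail)

-- ===== PRECONDITION & SPEC =====
-- Pre_ excludes exactly the inputs where Python A raises KeyError: some record lacks the
-- "exercise" key, or a non-None exercise dict lacks the "tutorial" key.
def Pre_pathCount (user : List (List (String × Option (List (String × String))))) : Prop :=
  (user.all (fun x => (pvLookup x "exercise").isSome &&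
    (((pvLookup x "exercise").getD none).all (fun ex => (pvLookup ex "tutorial").isSome)))) = true
instance (user : List (List (String × Option (List (String × String))))) : Decidable (Pre_pathCount user) := by unfold Pre_pathCount; infer_instance

def pvWitness_pathCount : (List (List (String × Option (List (String × String))))) :=
  [[("exercise", none)], [("exercise", some [("tutorial", "a")])], [("exercise", some [("tutorial", "b")])]]

def Spec_pathCount (user : List (List (String × Option (List (String × String))))) (out : Option (List (String × String))) : Prop := out = pathCount_alt user
instance (user : List (List (String × Option (List (String × String))))) (out : Option (List (String × String))) : Decidable (Spec_pathCount user out) := by unfold Spec_pathCount; infer_instance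

-- ===== CLAIM (what is proved, stated in full; the proofs are below) =====
def Claim_equal_pathCount : Prop := ∀ (user : List (List (String × Option (List (String × String))))), Dom_pathCount user → Pre_pathCount user → Spec_pathCount user (pathCount user)

-- ===== LEMMAS AND PROOFS =====

-- reference collapse of consecutive duplicates, used only by the proofs
def pvComp : String → List String → List String
  | _, [] => []
  | p, x :: t => if x = p then pvComp p t else x :: pvComp x t

theorem pathCountLoop_eq (rest : List String) : ∀ (path : List (String × String)) (prev : String),
    pathCountLoop path prev rest = path ++ (prev :: pvComp prev rest).zip (pvComp prev rest) := by
  induction rest with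
  | nil => intro path prev; simp [pathCountLoop, pvComp]
  | cons x t ih =>
      intro path prev
      by_cases h : x = prev
      · subst h
        simp [pathCountLoop, pvComp, ih]
      · simp [pathCountLoop, pvComp, h, ih, List.zip]

theorem foldl_compress (l : List String) : ∀ (acc : List String) (prev : String),
    acc ≠ [] → acc.getLast? = some prev →
    l.foldl pvCompressStep acc = acc ++ pvComp prev l := by
  induction l with
  | nil => intro acc prev _ _; simp [pvComp]
  | cons x t ih =>
      intro acc prev hne hlast
      by_cases h : x = prev
      · subst h
        have hstep : pvCompressStep acc x = acc := by
          simp [pvCompressStep, hne, hlast]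
        simp [List.foldl, hstep, pvComp, ih acc x hne hlast]
      · have hstep : pvCompressStep acc x = acc ++ [x] := by
          have hne' : ¬ prev = x := fun he => h he.symm
          simp [pvCompressStep, hlast, hne']
        have hlast' : (acc ++ [x]).getLast? = some x := by simp
        simp only [List.foldl, hstep, pvComp, if_neg h]
        rw [ih (acc ++ [x]) x (by simp) hlast']
        simp [List.append_assoc]

theorem compress_cons (prev : String) (rest : List String) :
    (prev :: rest).foldl pvCompressStep [] = prev :: pvComp prev rest := by
  have h0 : pvCompressStep [] prev = [prev] := by simp [pvCompressStep]
  simp only [List.foldl, h0]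
  rw [foldl_compress rest [prev] prev (by simp) (by simp)]
  simp

-- ===== VERDICT (by name: the statement is the Claim_ definition above) =====
theorem pathCount_spec : Claim_equal_pathCount := by
  intro user _ _
  unfold Spec_pathCount pathCount pathCount_alt
  cases h : pvNonesRemoved user with
  | nil => rfl
  | cons prev rest =>
      simp only [compress_cons]
      rw [pathCountLoop_eq]
      simp
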